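-- pv_equiv track=rewrite | github.com/enigma/aoc | python/2025/9.py | part2
-- ===== SOURCE A (Python) =====
-- def part2(tiles):
--     sorted_edges = []
--     for i in range(L := len(tiles)):
--         x1, y1 = tiles[i]
--         x2, y2 = tiles[(i + 1) % L]
--         sorted_edges.append((min(x1, x2), min(y1, y2), max(x1, x2), max(y1, y2)))
--     sorted_edges.sort(key=lambda x: (x[2] - x[0]) + (x[3] - x[1]), reverse=True)
--
--     def intersects(min_x, min_y, max_x, max_y):
--         for e_min_x, e_min_y, e_max_x, e_max_y in sorted_edges:
--             if (
--                 min_x < e_max_x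
--                 and max_x > e_min_x
--                 and min_y < e_max_y
--                 and max_y > e_min_y
--             ):
--                 return True
--         return False
--
--     best = 0
--     for i, (xi, yi) in enumerate(tiles):
--         for xj, yj in tiles[i + 1 :]:
--             min_x, max_x = min(xi, xj), max(xi, xj)
--             min_y, max_y = min(yi, yj), max(yi, yj)
--
--             area = (max_x - min_x + 1) * (max_y - min_y + 1)
--
--             if area > best and not intersects(min_x, min_y, max_x, max_y):
--                 best = area
--     return best
-- ===== SOURCE B (Python) =====
-- def part2(tiles):
--     # edges as bounding boxes of consecutive tiles (wrapping around)
--     edges = [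
--         (min(ax, bx), min(ay, by), max(ax, bx), max(ay, by))
--         for (ax, ay), (bx, by) in zip(tiles, tiles[1:] + tiles[:1])
--     ]
--
--     def clear(mnx, mny, mxx, mxy):
--         return all(
--             not (mnx < ex2 and mxx > ex1 and mny < ey2 and mxy > ey1)
--             for ex1, ey1, ex2, ey2 in edges
--         )
--
--     # all candidate rectangles, largest area first; return the first clear one
--     cands = []
--     for k, (xi, yi) in enumerate(tiles):
--         for xj, yj in tiles[k + 1:]:
--             mnx, mxx = min(xi, xj), max(xi, xj)
--             mny, mxy = min(yi, yj), max(yi, yj)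
--             cands.append(((mxx - mnx + 1) * (mxy - mny + 1), mnx, mny, mxx, mxy))
--     cands.sort(key=lambda c: c[0], reverse=True)
--     for area, mnx, mny, mxx, mxy in cands:
--         if clear(mnx, mny, mxx, mxy):
--             return area
--     return 0
-- ===== Notes on version B (the rewrite author's own statement) =====
-- stated objective: alternative
-- what changed: B gathers all candidate rectangles, sorts them by area in descending order and returns the area of the first one clear of every edge bounding box, instead of A's exhaustive running-max scan over all pairs; B also builds the edge boxes by zipping the tile list with its rotation instead of indexing with (i+1) % L.
import Mathlib
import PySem

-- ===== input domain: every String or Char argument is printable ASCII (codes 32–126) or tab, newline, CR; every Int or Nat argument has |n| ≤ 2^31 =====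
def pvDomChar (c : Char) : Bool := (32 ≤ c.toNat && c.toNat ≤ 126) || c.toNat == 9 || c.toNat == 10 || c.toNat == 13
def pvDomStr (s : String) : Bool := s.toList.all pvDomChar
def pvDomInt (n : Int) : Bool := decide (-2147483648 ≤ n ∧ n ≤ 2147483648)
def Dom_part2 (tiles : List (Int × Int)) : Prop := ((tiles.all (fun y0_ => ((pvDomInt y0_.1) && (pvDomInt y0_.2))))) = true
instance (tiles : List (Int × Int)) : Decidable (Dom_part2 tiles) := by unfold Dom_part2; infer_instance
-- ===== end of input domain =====

-- B replaces A's running max with nested scans by "sort candidate rectangles by area, return the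
-- first one clear of every edge bounding box" (alternative algorithm; same return value).

-- ===== PORT A =====
def part2 (tiles : List (Int × Int)) : Int :=
  let L : Int := PySem.List.len tiles
  -- edge bounding boxes; index i ∈ range(L) and (i+1) % L are always in range, so pyGetD's
  -- default (0, 0) is never used
  let edges0 : List (Int × Int × Int × Int) :=
    (PySem.List.pyRange 0 L 1).foldl (fun acc i =>
      let t1 := PySem.List.pyGetD tiles i (0, 0)
      let t2 := PySem.List.pyGetD tiles (PySem.Int.mod (i + 1) L) (0, 0)
      acc ++ [(min t1.1 t2.1, min t1.2 t2.2, max t1.1 t2.1, max t1.2 t2.2)]) []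
  let sorted_edges :=
    PySem.List.sorted edges0 (fun e => (e.2.2.1 - e.1) + (e.2.2.2 - e.2.1)) true
  let intersects := fun (mnx mny mxx mxy : Int) =>
    sorted_edges.any (fun e => mnx < e.2.2.1 && mxx > e.1 && mny < e.2.2.2 && mxy > e.2.1)
  (PySem.List.enumerate tiles).foldl (fun best it =>
    (PySem.List.slice tiles (some (it.1 + 1)) none).foldl (fun best t2 =>
      let mnx := min it.2.1 t2.1
      let mxx := max it.2.1 t2.1
      let mny := min it.2.2 t2.2
      let mxy := max it.2.2 t2.2
      let area := (mxx - mnx + 1) * (mxy - mny + 1)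
      if area > best ∧ intersects mnx mny mxx mxy = false then area else best) best) 0

-- ===== PORT B =====
def pvClear (edges : List (Int × Int × Int × Int)) (mnx mny mxx mxy : Int) : Bool :=
  edges.all (fun e => !(mnx < e.2.2.1 && mxx > e.1 && mny < e.2.2.2 && mxy > e.2.1))

def pvFirstClear (edges : List (Int × Int × Int × Int)) :
    List (Int × Int × Int × Int × Int) → Int
  | [] => 0
  | c :: rest =>
      if pvClear edges c.2.1 c.2.2.1 c.2.2.2.1 c.2.2.2.2 then c.1 else pvFirstClear edges rest

def part2_alt (tiles : List (Int × Int)) : Int :=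
  let edges := (tiles.zip (tiles.drop 1 ++ tiles.take 1)).map (fun p =>
    (min p.1.1 p.2.1, min p.1.2 p.2.2, max p.1.1 p.2.1, max p.1.2 p.2.2))
  let cands := (PySem.List.enumerate tiles).foldl (fun acc it =>
    acc ++ (PySem.List.slice tiles (some (it.1 + 1)) none).map (fun t2 =>
      ((max it.2.1 t2.1 - min it.2.1 t2.1 + 1) * (max it.2.2 t2.2 - min it.2.2 t2.2 + 1),
       min it.2.1 t2.1, min it.2.2 t2.2, max it.2.1 t2.1, max it.2.2 t2.2))) []
  pvFirstClear edges (PySem.List.sorted cands (fun c => c.1) true)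

-- ===== PRECONDITION & SPEC =====
def Spec_part2 (tiles : List (Int × Int)) (out : Int) : Prop := out = part2_alt tiles
instance (tiles : List (Int × Int)) (out : Int) : Decidable (Spec_part2 tiles out) := by unfold Spec_part2; infer_instance

-- ===== CLAIM (what is proved, stated in full; the proofs are below) =====
def Claim_equal_part2 : Prop := ∀ (tiles : List (Int × Int)), Dom_part2 tiles → Spec_part2 tiles (part2 tiles)

-- ===== LEMMAS AND PROOFS =====

-- canonical pieces shared by the two reformulations
def rectOf (t1 t2 : Int × Int) : Int × Int × Int × Int :=
  (min t1.1 t2.1, min t1.2 t2.2, max t1.1 t2.1, max t1.2 t2.2)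

def areaOf (r : Int × Int × Int × Int) : Int := (r.2.2.1 - r.1 + 1) * (r.2.2.2 - r.2.1 + 1)

def edgesOf (tiles : List (Int × Int)) : List (Int × Int × Int × Int) :=
  (tiles.zip (tiles.drop 1 ++ tiles.take 1)).map (fun p => rectOf p.1 p.2)

def hit (E : List (Int × Int × Int × Int)) (r : Int × Int × Int × Int) : Bool :=
  E.any (fun e => r.1 < e.2.2.1 && r.2.2.1 > e.1 && r.2.1 < e.2.2.2 && r.2.2.2 > e.2.1)

def pairsOf (tiles : List (Int × Int)) : List (Int × Int × Int × Int) :=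
  (PySem.List.enumerate tiles).flatMap (fun it =>
    (PySem.List.slice tiles (some (it.1 + 1)) none).map (rectOf it.2))

lemma edgesA_eq (tiles : List (Int × Int)) :
    (PySem.List.pyRange 0 (PySem.List.len tiles) 1).foldl (fun acc i =>
      let t1 := PySem.List.pyGetD tiles i (0, 0)
      let t2 := PySem.List.pyGetD tiles (PySem.Int.mod (i + 1) (PySem.List.len tiles)) (0, 0)
      acc ++ [(min t1.1 t2.1, min t1.2 t2.2, max t1.1 t2.1, max t1.2 t2.2)]) []
    = edgesOf tiles := by
  rw [PySem.List.foldl_append_singleton_eq_map]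
  simp only [List.nil_append]
  apply List.ext_getElem
  · simp [edgesOf, PySem.List.len_eq, PySem.List.length_pyRange_one]
    omega
  · intro k h1 h2
    have hk : k < tiles.length := by
      simpa [PySem.List.length_pyRange_one, PySem.List.len_eq] using h1
    simp only [List.getElem_map, PySem.List.getElem_pyRange_one, edgesOf]
    have h0 : (0:Int) + (k:Int) = (k:Int) := by ring
    rw [h0]
    have hL : (0:Int) < PySem.List.len tiles := by simp [PySem.List.len_eq]; omega
    have hmod : PySem.Int.mod ((k:Int) + 1) (PySem.List.len tiles)
        = (((k+1) % tiles.length : Nat) : Int) := by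
      rw [PySem.Int.mod_eq_emod_of_pos (a := (k:Int)+1) hL]
      simp [PySem.List.len_eq]
    rw [hmod]
    simp only [PySem.List.pyGetD_natCast]
    have hz : k < (tiles.zip (tiles.drop 1 ++ tiles.take 1)).length := by simp; omega
    rw [List.getElem_zip]
    have e1 : tiles.getD k (0,0) = tiles[k] := by rw [List.getD_eq_getElem]
    have e2 : tiles.getD ((k+1) % tiles.length) (0,0)
        = (tiles.drop 1 ++ tiles.take 1)[k]'(by simp; omega) := by
      rcases Nat.lt_or_ge (k+1) tiles.length with h | h
      · rw [Nat.mod_eq_of_lt h, List.getD_eq_getElem _ _ (by omega),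
            List.getElem_append_left (by simp; omega)]
        simp
      · have hk1 : k + 1 = tiles.length := by omega
        have hm0 : (k+1) % tiles.length = 0 := by rw [hk1]; simp
        rw [hm0, List.getD_eq_getElem _ _ (by omega),
            List.getElem_append_right (by simp; omega)]
        simp
        congr 1
        omega
    rw [e1, e2]
    rfl

lemma clear_eq_not_hit (E : List (Int × Int × Int × Int)) (r : Int × Int × Int × Int) :
    pvClear E r.1 r.2.1 r.2.2.1 r.2.2.2 = !hit E r := by
  simp [pvClear, hit, List.all_eq_not_any_not]

lemma foldl_max_of_le (l : List Int) (a : Int) (h : ∀ x ∈ l, x ≤ a) : l.foldl max a = a := by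
  induction l with
  | nil => rfl
  | cons x t ih =>
      simp only [List.foldl_cons]
      rw [max_eq_left (h x (by simp))]
      exact ih (fun y hy => h y (by simp [hy]))

lemma first_eq_max (E : List (Int × Int × Int × Int)) (cs : List (Int × Int × Int × Int × Int))
    (hs : cs.Pairwise (fun a b => b.1 ≤ a.1)) (hpos : ∀ c ∈ cs, 0 < c.1) :
    pvFirstClear E cs
      = ((cs.filter (fun c => !hit E c.2)).map (fun c => c.1)).foldl max 0 := by
  induction cs with
  | nil => rfl
  | cons c t ih =>
      rw [List.pairwise_cons] at hs
      have hcl : pvClear E c.2.1 c.2.2.1 c.2.2.2.1 c.2.2.2.2 = !hit E c.2 :=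
        clear_eq_not_hit E c.2
      by_cases hh : hit E c.2
      · simp only [pvFirstClear, hcl, hh, Bool.not_true, List.filter_cons]
        exact ih hs.2 (fun x hx => hpos x (by simp [hx]))
      · simp only [Bool.not_eq_true] at hh
        simp only [pvFirstClear, hcl, hh, Bool.not_false, if_true, List.filter_cons,
          List.map_cons, List.foldl_cons]
        rw [max_eq_right (le_of_lt (hpos c (by simp)))]
        rw [foldl_max_of_le]
        intro x hx
        simp only [List.mem_map, List.mem_filter] at hx
        obtain ⟨d, ⟨hd, _⟩, rfl⟩ := hx
        exact hs.1 d hd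

lemma areaOf_pos (tiles : List (Int × Int)) (r : Int × Int × Int × Int)
    (h : r ∈ pairsOf tiles) : 0 < areaOf r := by
  simp only [pairsOf, List.mem_flatMap, List.mem_map] at h
  obtain ⟨it, -, t2, -, rfl⟩ := h
  simp only [areaOf, rectOf]
  exact mul_pos (by omega) (by omega)

theorem part2_eq_alt (tiles : List (Int × Int)) : part2 tiles = part2_alt tiles := by
  -- names for the pieces
  set E := edgesOf tiles with hE
  -- ---- A side ----
  have hA0 : part2 tiles
      = (PySem.List.enumerate tiles).foldl (fun best it =>
          (PySem.List.slice tiles (some (it.1 + 1)) none).foldl (fun best t2 =>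
            if areaOf (rectOf it.2 t2) > best ∧
               hit (PySem.List.sorted
                 ((PySem.List.pyRange 0 (PySem.List.len tiles) 1).foldl (fun acc i =>
                   let t1 := PySem.List.pyGetD tiles i (0, 0)
                   let t2 := PySem.List.pyGetD tiles
                     (PySem.Int.mod (i + 1) (PySem.List.len tiles)) (0, 0)
                   acc ++ [(min t1.1 t2.1, min t1.2 t2.2, max t1.1 t2.1, max t1.2 t2.2)]) [])
                 (fun e => (e.2.2.1 - e.1) + (e.2.2.2 - e.2.1)) true)
                 (rectOf it.2 t2) = false
            then areaOf (rectOf it.2 t2) else best) best) 0 := rfl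
  rw [edgesA_eq, ← hE] at hA0
  have hA1 : part2 tiles
      = (pairsOf tiles).foldl (fun best r =>
          if areaOf r > best ∧
             hit (PySem.List.sorted E (fun e => (e.2.2.1 - e.1) + (e.2.2.2 - e.2.1)) true) r
               = false
          then areaOf r else best) 0 := by
    rw [hA0, pairsOf, List.foldl_flatMap]
    simp only [List.foldl_map]
  have hAstep :
      (fun (best : Int) (r : Int × Int × Int × Int) =>
          if areaOf r > best ∧
             hit (PySem.List.sorted E (fun e => (e.2.2.1 - e.1) + (e.2.2.2 - e.2.1)) true) r
               = false
          then areaOf r else best)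
      = (fun (best : Int) (r : Int × Int × Int × Int) =>
          if (!hit E r) = true then max best (areaOf r) else best) := by
    funext best r
    have hperm : hit (PySem.List.sorted E (fun e => (e.2.2.1 - e.1) + (e.2.2.2 - e.2.1)) true) r
        = hit E r := by
      simp only [hit]
      exact List.Perm.any_eq (PySem.List.sorted_perm _ _ _)
    rw [hperm]
    by_cases h : hit E r
    · simp [h]
    · simp only [Bool.not_eq_true] at h
      simp [h, max_def]
      split_ifs <;> omega
  rw [hAstep, PySem.List.foldl_if_eq_foldl_filter, ← List.foldl_map] at hA1
  -- ---- B side ----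
  have hB0 : part2_alt tiles
      = pvFirstClear E (PySem.List.sorted
          ((PySem.List.enumerate tiles).foldl (fun acc it =>
            acc ++ (PySem.List.slice tiles (some (it.1 + 1)) none).map (fun t2 =>
              ((max it.2.1 t2.1 - min it.2.1 t2.1 + 1) * (max it.2.2 t2.2 - min it.2.2 t2.2 + 1),
               min it.2.1 t2.1, min it.2.2 t2.2, max it.2.1 t2.1, max it.2.2 t2.2))) [])
          (fun c => c.1) true) := rfl
  have hcands :
      (PySem.List.enumerate tiles).foldl (fun acc it =>
            acc ++ (PySem.List.slice tiles (some (it.1 + 1)) none).map (fun t2 =>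
              ((max it.2.1 t2.1 - min it.2.1 t2.1 + 1) * (max it.2.2 t2.2 - min it.2.2 t2.2 + 1),
               min it.2.1 t2.1, min it.2.2 t2.2, max it.2.1 t2.1, max it.2.2 t2.2))) []
      = (pairsOf tiles).map (fun r => (areaOf r, r)) := by
    rw [PySem.List.foldl_append_eq_flatMap]
    simp only [List.nil_append, pairsOf, List.map_flatMap, List.map_map]
    rfl
  rw [hcands] at hB0
  set cands := (pairsOf tiles).map (fun r => (areaOf r, r)) with hcdef
  have hsperm : (PySem.List.sorted cands (fun c => c.1) true).Perm cands :=
    PySem.List.sorted_perm _ _ _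
  have hfm := first_eq_max E (PySem.List.sorted cands (fun c => c.1) true)
      (PySem.List.sorted_pairwise_rev _ _)
      (by
        intro c hc
        rw [PySem.List.mem_sorted] at hc
        rw [hcdef] at hc
        simp only [List.mem_map] at hc
        obtain ⟨r, hr, rfl⟩ := hc
        exact areaOf_pos tiles r hr)
  rw [hfm] at hB0
  -- the two filtered area lists are permutations of each other
  have hpermlists :
      (((PySem.List.sorted cands (fun c => c.1) true).filter (fun c => !hit E c.2)).map
        (fun c => c.1)).Perm
      (((pairsOf tiles).filter (fun r => !hit E r)).map areaOf) := by
    have h1 := (hsperm.filter (fun c => !hit E c.2)).map (fun c => c.1)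
    have h2 : ((cands.filter (fun c => !hit E c.2)).map (fun c => c.1))
        = ((pairsOf tiles).filter (fun r => !hit E r)).map areaOf := by
      rw [hcdef, List.filter_map, List.map_map]
      rfl
    rw [h2] at h1
    exact h1
  rw [hA1, hB0]
  exact List.Perm.foldl_op_eq hpermlists.symm

-- ===== VERDICT (by name: the statement is the Claim_ definition above) =====
theorem part2_spec : Claim_equal_part2 := by
  intro tiles _
  exact part2_eq_alt tiles
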